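-- pv_equiv track=rewrite | github.com/yeolsim2hajo/Team_hard | wonkyoung/programmers/level 1/옹알이_2.py | solution
-- ===== SOURCE A (Python) =====
-- def solution(babbling):
--     answer = 0
--     okay = {'aya','ye', 'woo', 'ma'}
--     for each in babbling:
--         i = 0
--         before = ''
--         while i < len(each):
--             two, three = each[i:i+2], each[i:i+3]
--             if two in okay and before != two:
--                 before = two
--                 i += 2
--             elif three in okay and before != three:
--                 before = three
--                 i += 3
--             else:
--                 break
--         else:
--             answer += 1
--     return answer
-- ===== SOURCE B (Python) =====
-- def solution(babbling):
--     SYLL = ("aya", "ye", "woo", "ma")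
--
--     def tokens_of(word):
--         # greedy non-overlapping syllable extraction (like re.findall(r'aya|ye|woo|ma', word))
--         toks = []
--         i = 0
--         while i < len(word):
--             for s in SYLL:
--                 if word.startswith(s, i):
--                     toks.append(s)
--                     i += len(s)
--                     break
--             else:
--                 i += 1
--         return toks
--
--     count = 0
--     for word in babbling:
--         toks = tokens_of(word)
--         if "".join(toks) == word and all(a != b for a, b in zip(toks, toks[1:])):
--             count += 1
--     return count
-- ===== Notes on version B (the rewrite author's own statement) =====
-- stated objective: idiomatic
-- what changed: A's single fused while-loop that greedily consumes syllables while tracking the previous one and breaking on failure is replaced by a tokenize-first/validate-after decomposition: extract all syllables into a list (findall-style), then separately check full coverage (join equals the word) and no adjacent equal tokens.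
import Mathlib
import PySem

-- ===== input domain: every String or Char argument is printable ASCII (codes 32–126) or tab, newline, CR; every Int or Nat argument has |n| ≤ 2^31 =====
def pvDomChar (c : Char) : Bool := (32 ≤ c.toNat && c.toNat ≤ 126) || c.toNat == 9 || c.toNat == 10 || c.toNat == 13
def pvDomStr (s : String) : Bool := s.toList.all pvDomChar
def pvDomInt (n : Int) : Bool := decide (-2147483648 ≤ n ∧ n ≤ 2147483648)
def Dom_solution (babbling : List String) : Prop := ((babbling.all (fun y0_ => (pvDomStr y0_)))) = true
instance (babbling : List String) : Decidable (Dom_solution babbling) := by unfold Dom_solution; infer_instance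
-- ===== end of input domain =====

-- B replaces A's fused break-driven greedy scan (index + `before` state) by a tokenize-first /
-- validate-after decomposition: extract all syllables into a list, then check full coverage and
-- no adjacent repeats as two separate passes (objective: idiomatic; same value everywhere).

-- ===== PORT A =====
-- okay = {'aya','ye','woo','ma'}; strings are ported as lists of code points
def pvOkay : PySem.Set (List Char) :=
  PySem.Set.ofList [['a','y','a'], ['y','e'], ['w','o','o'], ['m','a']]

-- A's while-loop: index i, previous syllable `before`; returns true iff the loop exits
-- normally (Python's for/else), i.e. the whole word was consumed
def solLoop (cs : List Char) (i : Nat) (before : List Char) : Bool :=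
  if _h : i < cs.length then
    let two := PySem.List.slice cs (some (i : Int)) (some ((i : Int) + 2))
    let three := PySem.List.slice cs (some (i : Int)) (some ((i : Int) + 3))
    if PySem.Set.contains pvOkay two && before != two then
      solLoop cs (i + 2) two
    else if PySem.Set.contains pvOkay three && before != three then
      solLoop cs (i + 3) three
    else false
  else true
termination_by cs.length - i

def solution (babbling : List String) : Int :=
  babbling.foldl (fun answer each => if solLoop each.toList 0 [] then answer + 1 else answer) 0

-- ===== PORT B =====
def pvSyll : List (List Char) := [['a','y','a'], ['y','e'], ['w','o','o'], ['m','a']]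

-- re-findall-style tokenizer: emit the syllable starting at the current position, else skip a char
def tokensOf (cs : List Char) : List (List Char) :=
  match cs with
  | [] => []
  | c :: rest =>
    match _h : pvSyll.find? (fun s => PySem.Chars.startswith (c :: rest) s) with
    | some s => s :: tokensOf ((c :: rest).drop s.length)
    | none => tokensOf rest
termination_by cs.length
decreasing_by
  · have hs := List.mem_of_find?_eq_some _h
    fin_cases hs <;> simp
  · simp

def solution_alt (babbling : List String) : Int :=
  babbling.foldl (fun count word =>
    let toks := tokensOf word.toList
    if PySem.Chars.join [] toks == word.toList
        && (toks.zip (toks.drop 1)).all (fun p => p.1 != p.2)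
    then count + 1 else count) 0

-- ===== PRECONDITION & SPEC =====
def Spec_solution (babbling : List String) (out : Int) : Prop := out = solution_alt babbling
instance (babbling : List String) (out : Int) : Decidable (Spec_solution babbling out) := by unfold Spec_solution; infer_instance

-- ===== CLAIM (what is proved, stated in full; the proofs are below) =====
def Claim_equal_solution : Prop := ∀ (babbling : List String), Dom_solution babbling → Spec_solution babbling (solution babbling)

-- ===== LEMMAS AND PROOFS =====

-- the unique greedy tiling of a word into non-empty syllables (none = a stray character)
def tile? (d : List Char) : Option (List (List Char)) :=
  if _h : d = [] then some []
  else if d.take 2 = ['y','e'] then (tile? (d.drop 2)).map (['y','e'] :: ·)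
  else if d.take 2 = ['m','a'] then (tile? (d.drop 2)).map (['m','a'] :: ·)
  else if d.take 3 = ['a','y','a'] then (tile? (d.drop 3)).map (['a','y','a'] :: ·)
  else if d.take 3 = ['w','o','o'] then (tile? (d.drop 3)).map (['w','o','o'] :: ·)
  else none
termination_by d.length
decreasing_by
  all_goals (have : 0 < d.length := List.length_pos_iff.mpr _h; simp; omega)

-- A's loop as a chain condition on the tiling
def chainOk (b : List Char) : List (List Char) → Bool
  | [] => true
  | t :: ts => (b != t) && chainOk t ts

-- B's two checks, factored out
def adjOk (ts : List (List Char)) : Bool := (ts.zip (ts.drop 1)).all (fun p => p.1 != p.2)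

def bcheck (d : List Char) : Bool :=
  PySem.Chars.join [] (tokensOf d) == d && adjOk (tokensOf d)

lemma beq_eq_decide_list (x y : List Char) : (x == y) = decide (x = y) := by
  cases h : x == y
  · simp [(beq_iff_eq (a := x) (b := y)).symm, h]
  · simp [(beq_iff_eq (a := x) (b := y)).mp h]

lemma contains_pvOkay (x : List Char) :
    PySem.Set.contains pvOkay x =
      (x == ['a','y','a'] || x == ['y','e'] || x == ['w','o','o'] || x == ['m','a']) := by
  have h : pvOkay = [['a','y','a'], ['y','e'], ['w','o','o'], ['m','a']] := by decide
  rw [h]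
  simp [PySem.Set.contains, beq_eq_decide_list, Bool.or_assoc]

lemma join_nil_cons (t : List Char) (ts : List (List Char)) :
    PySem.Chars.join [] (t :: ts) = t ++ PySem.Chars.join [] ts := by
  cases ts with
  | nil => simp [PySem.Chars.join_singleton, PySem.Chars.join_nil]
  | cons u us => simp [PySem.Chars.join_cons_cons]

lemma take2_shape {d : List Char} {a b : Char} (h : d.take 2 = [a, b]) :
    d = a :: b :: d.drop 2 := by
  rcases d with _ | ⟨x, _ | ⟨y, t⟩⟩ <;> simp_all

lemma take3_shape {d : List Char} {a b c : Char} (h : d.take 3 = [a, b, c]) :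
    d = a :: b :: c :: d.drop 3 := by
  rcases d with _ | ⟨x, _ | ⟨y, _ | ⟨z, t⟩⟩⟩ <;> simp_all

lemma take3_len2 {d : List Char} {a b : Char} (h : d.take 3 = [a, b]) : d = [a, b] := by
  rcases d with _ | ⟨x, _ | ⟨y, _ | ⟨z, t⟩⟩⟩ <;> simp_all

lemma take2_of_take3 (d : List Char) : (d.take 3).take 2 = d.take 2 := by
  rw [List.take_take]; rfl

lemma tile?_ye {d : List Char} (hd : d ≠ []) (h : d.take 2 = ['y','e']) :
    tile? d = (tile? (d.drop 2)).map (['y','e'] :: ·) := by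
  rw [tile?.eq_def]; rw [dif_neg hd, if_pos h]

lemma tile?_ma {d : List Char} (hd : d ≠ []) (h : d.take 2 = ['m','a']) :
    tile? d = (tile? (d.drop 2)).map (['m','a'] :: ·) := by
  rw [tile?.eq_def]; rw [dif_neg hd, if_neg (by rw [h]; decide), if_pos h]

lemma tile?_aya {d : List Char} (h : d.take 3 = ['a','y','a']) :
    tile? d = (tile? (d.drop 3)).map (['a','y','a'] :: ·) := by
  have hd : d ≠ [] := by rintro rfl; simp at h
  have h2 : d.take 2 = ['a','y'] := by rw [← take2_of_take3, h]; rfl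
  rw [tile?.eq_def]
  rw [dif_neg hd, if_neg (by rw [h2]; decide), if_neg (by rw [h2]; decide), if_pos h]

lemma tile?_woo {d : List Char} (h : d.take 3 = ['w','o','o']) :
    tile? d = (tile? (d.drop 3)).map (['w','o','o'] :: ·) := by
  have hd : d ≠ [] := by rintro rfl; simp at h
  have h2 : d.take 2 = ['w','o'] := by rw [← take2_of_take3, h]; rfl
  rw [tile?.eq_def]
  rw [dif_neg hd, if_neg (by rw [h2]; decide), if_neg (by rw [h2]; decide),
      if_neg (by rw [h]; decide), if_pos h]

lemma tile?_none {d : List Char} (hd : d ≠ []) (h2 : d.take 2 ≠ ['y','e'])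
    (h2' : d.take 2 ≠ ['m','a']) (h3 : d.take 3 ≠ ['a','y','a']) (h3' : d.take 3 ≠ ['w','o','o']) :
    tile? d = none := by
  rw [tile?.eq_def]
  rw [dif_neg hd, if_neg h2, if_neg h2', if_neg h3, if_neg h3']

lemma solLoop_eq (cs : List Char) (i : Nat) (b : List Char) :
    solLoop cs i b = (tile? (cs.drop i)).elim false (chainOk b) := by
  induction i, b using solLoop.induct cs with
  | case1 i b hlt two hcond IH =>
    simp only [two] at hcond IH
    have hs2 : PySem.List.slice cs (some (i : Int)) (some ((i : Int) + 2)) = (cs.drop i).take 2 := by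
      exact_mod_cast PySem.List.slice_natCast_add cs i 2
    have hdne : cs.drop i ≠ [] := by
      simp only [ne_eq, List.drop_eq_nil_iff]; omega
    have hdrop2 : cs.drop (i + 2) = (cs.drop i).drop 2 := by
      rw [List.drop_drop, Nat.add_comm]
    rw [solLoop, dif_pos hlt]
    simp only [hcond, if_true]
    rw [IH]
    simp only [hs2] at hcond ⊢
    rw [Bool.and_eq_true] at hcond
    obtain ⟨hcont, hneq⟩ := hcond
    rw [contains_pvOkay] at hcont
    simp only [Bool.or_eq_true, beq_iff_eq] at hcont
    rcases hcont with ((h | h) | h) | h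
    · exfalso; have := congrArg List.length h
      simp [List.length_take] at this
      omega
    · rw [h] at hneq
      rw [tile?_ye hdne h, hdrop2]
      rcases tile? ((cs.drop i).drop 2) with _ | ts
      · rfl
      · simp [chainOk, h, hneq]
    · exfalso; have := congrArg List.length h
      simp [List.length_take] at this
      omega
    · rw [h] at hneq
      rw [tile?_ma hdne h, hdrop2]
      rcases tile? ((cs.drop i).drop 2) with _ | ts
      · rfl
      · simp [chainOk, h, hneq]
  | case2 i b hlt two three hc1 hc2 IH =>
    simp only [two, three] at hc1 hc2 IH
    rw [Bool.not_eq_true] at hc1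
    have hs2 : PySem.List.slice cs (some (i : Int)) (some ((i : Int) + 2)) = (cs.drop i).take 2 := by
      exact_mod_cast PySem.List.slice_natCast_add cs i 2
    have hs3 : PySem.List.slice cs (some (i : Int)) (some ((i : Int) + 3)) = (cs.drop i).take 3 := by
      exact_mod_cast PySem.List.slice_natCast_add cs i 3
    have hdne : cs.drop i ≠ [] := by
      simp only [ne_eq, List.drop_eq_nil_iff]; omega
    have hdrop3 : cs.drop (i + 3) = (cs.drop i).drop 3 := by
      rw [List.drop_drop, Nat.add_comm]
    rw [solLoop, dif_pos hlt]
    simp only [hc1, hc2, if_true, Bool.false_eq_true, if_false]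
    rw [IH]
    simp only [hs2] at hc1
    simp only [hs3] at hc2 ⊢
    rw [Bool.and_eq_true] at hc2
    obtain ⟨hcont3, hneq3⟩ := hc2
    rw [contains_pvOkay] at hcont3
    simp only [Bool.or_eq_true, beq_iff_eq] at hcont3
    rcases hcont3 with ((h | h) | h) | h
    · rw [h] at hneq3
      rw [tile?_aya h, hdrop3]
      rcases tile? ((cs.drop i).drop 3) with _ | ts
      · rfl
      · simp [chainOk, h, hneq3]
    · exfalso
      have hd : cs.drop i = ['y','e'] := take3_len2 h
      have h2 : (cs.drop i).take 2 = ['y','e'] := by rw [hd]; rfl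
      rw [h] at hneq3
      have hx : (pvOkay.contains ((cs.drop i).take 2) && b != (cs.drop i).take 2) = true := by
        rw [Bool.and_eq_true, contains_pvOkay, h2]
        exact ⟨by decide, hneq3⟩
      rw [hc1] at hx; exact Bool.false_ne_true hx
    · rw [h] at hneq3
      rw [tile?_woo h, hdrop3]
      rcases tile? ((cs.drop i).drop 3) with _ | ts
      · rfl
      · simp [chainOk, h, hneq3]
    · exfalso
      have hd : cs.drop i = ['m','a'] := take3_len2 h
      have h2 : (cs.drop i).take 2 = ['m','a'] := by rw [hd]; rfl
      rw [h] at hneq3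
      have hx : (pvOkay.contains ((cs.drop i).take 2) && b != (cs.drop i).take 2) = true := by
        rw [Bool.and_eq_true, contains_pvOkay, h2]
        exact ⟨by decide, hneq3⟩
      rw [hc1] at hx; exact Bool.false_ne_true hx
  | case3 i b hlt two three hc1 hc2 =>
    simp only [two, three] at hc1 hc2
    rw [Bool.not_eq_true] at hc1
    rw [Bool.not_eq_true] at hc2
    have hs2 : PySem.List.slice cs (some (i : Int)) (some ((i : Int) + 2)) = (cs.drop i).take 2 := by
      exact_mod_cast PySem.List.slice_natCast_add cs i 2
    have hs3 : PySem.List.slice cs (some (i : Int)) (some ((i : Int) + 3)) = (cs.drop i).take 3 := by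
      exact_mod_cast PySem.List.slice_natCast_add cs i 3
    have hdne : cs.drop i ≠ [] := by
      simp only [ne_eq, List.drop_eq_nil_iff]; omega
    rw [solLoop, dif_pos hlt]
    simp only [hc1, hc2, Bool.false_eq_true, if_false]
    simp only [hs2] at hc1
    simp only [hs3] at hc2
    by_cases hye : (cs.drop i).take 2 = ['y','e'] ∨ (cs.drop i).take 2 = ['m','a']
    · have hcont : PySem.Set.contains pvOkay ((cs.drop i).take 2) = true := by
        rw [contains_pvOkay]
        rcases hye with h | h <;> rw [h] <;> decide
      have hb : b = (cs.drop i).take 2 := by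
        by_contra hbne
        have : (pvOkay.contains (List.take 2 (cs.drop i)) && b != List.take 2 (cs.drop i)) = true := by
          rw [Bool.and_eq_true, bne_iff_ne]; exact ⟨hcont, hbne⟩
        rw [hc1] at this; exact Bool.false_ne_true this
      rcases hye with h | h
      · rw [tile?_ye hdne h]
        rcases tile? ((cs.drop i).drop 2) with _ | ts
        · rfl
        · simp [chainOk, hb, h]
      · rw [tile?_ma hdne h]
        rcases tile? ((cs.drop i).drop 2) with _ | ts
        · rfl
        · simp [chainOk, hb, h]
    · rw [not_or] at hye; obtain ⟨hye1, hye2⟩ := hye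
      have hye : (cs.drop i).take 2 ≠ ['y','e'] ∧ (cs.drop i).take 2 ≠ ['m','a'] := ⟨hye1, hye2⟩
      by_cases h3 : (cs.drop i).take 3 = ['a','y','a'] ∨ (cs.drop i).take 3 = ['w','o','o']
      · have hcont : PySem.Set.contains pvOkay ((cs.drop i).take 3) = true := by
          rw [contains_pvOkay]
          rcases h3 with h | h <;> rw [h] <;> decide
        have hb : b = (cs.drop i).take 3 := by
          by_contra hbne
          have hx : (pvOkay.contains (List.take 3 (cs.drop i)) && b != List.take 3 (cs.drop i)) = true := by
            rw [Bool.and_eq_true, bne_iff_ne]; exact ⟨hcont, hbne⟩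
          rw [hc2] at hx; exact Bool.false_ne_true hx
        rcases h3 with h | h
        · rw [tile?_aya h]
          rcases tile? ((cs.drop i).drop 3) with _ | ts
          · rfl
          · simp [chainOk, hb, h]
        · rw [tile?_woo h]
          rcases tile? ((cs.drop i).drop 3) with _ | ts
          · rfl
          · simp [chainOk, hb, h]
      · rw [not_or] at h3
        rw [tile?_none hdne hye.1 hye.2 h3.1 h3.2]
        rfl
  | case4 i b hge =>
    have hd : cs.drop i = [] := by
      rw [List.drop_eq_nil_iff]; omega
    rw [solLoop, dif_neg hge, hd]
    rw [tile?.eq_def]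
    simp [chainOk]

lemma startswith_eq_decide (d s : List Char) :
    PySem.Chars.startswith d s = decide (d.take s.length = s) := by
  cases hb : PySem.Chars.startswith d s
  · have hnp : ¬ s <+: d := fun hp => by
      rw [(PySem.Chars.startswith_iff d s).mpr hp] at hb
      exact Bool.false_ne_true hb.symm
    rw [List.prefix_iff_eq_take] at hnp
    symm
    simp only [decide_eq_false_iff_not]
    exact fun he => hnp he.symm
  · have hp := (PySem.Chars.startswith_iff d s).mp hb
    rw [List.prefix_iff_eq_take] at hp
    simp [hp.symm]

lemma find_syll_eq (d : List Char) :
    pvSyll.find? (fun s => PySem.Chars.startswith d s) =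
      (if d.take 3 = ['a','y','a'] then some ['a','y','a']
       else if d.take 2 = ['y','e'] then some ['y','e']
       else if d.take 3 = ['w','o','o'] then some ['w','o','o']
       else if d.take 2 = ['m','a'] then some ['m','a'] else none) := by
  simp only [pvSyll, List.find?, startswith_eq_decide, List.length_cons, List.length_nil]
  split_ifs <;> simp_all

lemma tokensOf_step_some {d s : List Char} (hd : d ≠ [])
    (h : pvSyll.find? (fun t => PySem.Chars.startswith d t) = some s) :
    tokensOf d = s :: tokensOf (d.drop s.length) := by
  obtain ⟨c, rest, rfl⟩ := List.exists_cons_of_ne_nil hd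
  rw [tokensOf]
  split
  · rename_i s' hs'
    rw [h] at hs'
    obtain rfl := Option.some_injective _ hs'
    rfl
  · rename_i hs'
    rw [h] at hs'
    simp at hs'

lemma tokensOf_step_none {c : Char} {rest : List Char}
    (h : pvSyll.find? (fun t => PySem.Chars.startswith (c :: rest) t) = none) :
    tokensOf (c :: rest) = tokensOf rest := by
  rw [tokensOf]
  split
  · rename_i s' hs'
    rw [h] at hs'
    exact absurd hs' (by simp)
  · rfl

lemma tokensOf_of_tile (d : List Char) : ∀ (ts : List (List Char)), tile? d = some ts →
    tokensOf d = ts ∧ PySem.Chars.join [] ts = d := by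
  induction d using tile?.induct with
  | case1 =>
    intro ts h
    rw [tile?.eq_def] at h
    simp at h
    subst h
    constructor
    · rw [tokensOf]
    · exact PySem.Chars.join_nil []
  | case2 d hnil h2 IH =>
    intro ts h
    rw [tile?_ye hnil h2, Option.map_eq_some_iff] at h
    obtain ⟨ts', hts', rfl⟩ := h
    obtain ⟨htok, hjoin⟩ := IH ts' hts'
    have hfind : pvSyll.find? (fun t => PySem.Chars.startswith d t) = some ['y','e'] := by
      rw [find_syll_eq]
      have h3 : d.take 3 ≠ ['a','y','a'] := fun hh => by
        rw [← take2_of_take3, hh] at h2; exact absurd h2 (by decide)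
      rw [if_neg h3, if_pos h2]
    constructor
    · rw [tokensOf_step_some hnil hfind, show (['y','e'] : List Char).length = 2 from rfl, htok]
    · rw [join_nil_cons, hjoin]
      conv_rhs => rw [take2_shape h2]
      rfl
  | case3 d hnil h2 h2' IH =>
    intro ts h
    rw [tile?_ma hnil h2', Option.map_eq_some_iff] at h
    obtain ⟨ts', hts', rfl⟩ := h
    obtain ⟨htok, hjoin⟩ := IH ts' hts'
    have hfind : pvSyll.find? (fun t => PySem.Chars.startswith d t) = some ['m','a'] := by
      rw [find_syll_eq]
      have h3 : d.take 3 ≠ ['a','y','a'] := fun hh => by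
        rw [← take2_of_take3, hh] at h2'; exact absurd h2' (by decide)
      have hw : d.take 3 ≠ ['w','o','o'] := fun hh => by
        rw [← take2_of_take3, hh] at h2'; exact absurd h2' (by decide)
      rw [if_neg h3, if_neg h2, if_neg hw, if_pos h2']
    constructor
    · rw [tokensOf_step_some hnil hfind, show (['m','a'] : List Char).length = 2 from rfl, htok]
    · rw [join_nil_cons, hjoin]
      conv_rhs => rw [take2_shape h2']
      rfl
  | case4 d hnil h2 h2' h3 IH =>
    intro ts h
    rw [tile?_aya h3, Option.map_eq_some_iff] at h
    obtain ⟨ts', hts', rfl⟩ := h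
    obtain ⟨htok, hjoin⟩ := IH ts' hts'
    have hfind : pvSyll.find? (fun t => PySem.Chars.startswith d t) = some ['a','y','a'] := by
      rw [find_syll_eq, if_pos h3]
    constructor
    · rw [tokensOf_step_some hnil hfind, show (['a','y','a'] : List Char).length = 3 from rfl, htok]
    · rw [join_nil_cons, hjoin]
      conv_rhs => rw [take3_shape h3]
      rfl
  | case5 d hnil h2 h2' h3 h3' IH =>
    intro ts h
    rw [tile?_woo h3', Option.map_eq_some_iff] at h
    obtain ⟨ts', hts', rfl⟩ := h
    obtain ⟨htok, hjoin⟩ := IH ts' hts'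
    have hfind : pvSyll.find? (fun t => PySem.Chars.startswith d t) = some ['w','o','o'] := by
      rw [find_syll_eq, if_neg h3, if_neg h2, if_pos h3']
    constructor
    · rw [tokensOf_step_some hnil hfind, show (['w','o','o'] : List Char).length = 3 from rfl, htok]
    · rw [join_nil_cons, hjoin]
      conv_rhs => rw [take3_shape h3']
      rfl
  | case6 d hnil h2 h2' h3 h3' =>
    intro ts h
    rw [tile?_none hnil h2 h2' h3 h3'] at h
    exact absurd h (by simp)

lemma tile?_step {d s : List Char} (hmem : s ∈ pvSyll) (hp : d.take s.length = s) :
    tile? d = (tile? (d.drop s.length)).map (s :: ·) := by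
  fin_cases hmem
  · exact tile?_aya hp
  · exact tile?_ye (fun h0 => by rw [h0] at hp; simp at hp) hp
  · exact tile?_woo hp
  · exact tile?_ma (fun h0 => by rw [h0] at hp; simp at hp) hp

lemma join_tokensOf_length (d : List Char) :
    (PySem.Chars.join [] (tokensOf d)).length ≤ d.length := by
  induction d using tokensOf.induct with
  | case1 =>
    rw [tokensOf]
    simp [PySem.Chars.join_nil]
  | case2 c rest s hfind IH =>
    rw [tokensOf_step_some (by simp) hfind, join_nil_cons]
    have hps : PySem.Chars.startswith (c :: rest) s = true := by
      have := List.find?_some hfind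
      simpa using this
    have hle : s.length ≤ (c :: rest).length :=
      ((PySem.Chars.startswith_iff _ _).mp hps).length_le
    simp only [List.length_append, List.length_drop] at *
    omega
  | case3 c rest hfind IH =>
    rw [tokensOf_step_none hfind]
    simp only [List.length_cons]
    omega

lemma join_tokensOf_lt (d : List Char) (h : tile? d = none) :
    (PySem.Chars.join [] (tokensOf d)).length < d.length := by
  induction d using tokensOf.induct with
  | case1 =>
    rw [tile?.eq_def] at h
    simp at h
  | case2 c rest s hfind IH =>
    have hmem := List.mem_of_find?_eq_some hfind
    have hps : PySem.Chars.startswith (c :: rest) s = true := by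
      have := List.find?_some hfind
      simpa using this
    have hp := (PySem.Chars.startswith_iff _ _).mp hps
    have htake : (c :: rest).take s.length = s := ((List.prefix_iff_eq_take).mp hp).symm
    rw [tile?_step hmem htake, Option.map_eq_none_iff] at h
    have hlen := IH h
    rw [tokensOf_step_some (by simp) hfind, join_nil_cons]
    have hle : s.length ≤ (c :: rest).length := hp.length_le
    simp only [List.length_append, List.length_drop] at *
    omega
  | case3 c rest hfind IH =>
    rw [tokensOf_step_none hfind]
    have := join_tokensOf_length rest
    simp only [List.length_cons]
    omega

lemma bcheck_eq (d : List Char) : bcheck d = (tile? d).elim false adjOk := by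
  cases h : tile? d with
  | some ts =>
    obtain ⟨h1, h2⟩ := tokensOf_of_tile d ts h
    unfold bcheck
    rw [h1, h2]
    simp
  | none =>
    have hlt := join_tokensOf_lt d h
    have hne : ¬ (PySem.Chars.join [] (tokensOf d) = d) := fun he => by
      rw [he] at hlt; omega
    unfold bcheck
    simp [hne]

lemma tile_nonempty (d : List Char) : ∀ (ts : List (List Char)), tile? d = some ts →
    ∀ t ∈ ts, t ≠ [] := by
  induction d using tile?.induct with
  | case1 =>
    intro ts h
    rw [tile?.eq_def] at h
    simp at h
    subst h
    simp
  | case2 d hnil h2 IH =>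
    intro ts h
    rw [tile?_ye hnil h2, Option.map_eq_some_iff] at h
    obtain ⟨ts', hts', rfl⟩ := h
    intro t ht
    rcases List.mem_cons.mp ht with rfl | ht'
    · simp
    · exact IH ts' hts' t ht'
  | case3 d hnil h2 h2' IH =>
    intro ts h
    rw [tile?_ma hnil h2', Option.map_eq_some_iff] at h
    obtain ⟨ts', hts', rfl⟩ := h
    intro t ht
    rcases List.mem_cons.mp ht with rfl | ht'
    · simp
    · exact IH ts' hts' t ht'
  | case4 d hnil h2 h2' h3 IH =>
    intro ts h
    rw [tile?_aya h3, Option.map_eq_some_iff] at h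
    obtain ⟨ts', hts', rfl⟩ := h
    intro t ht
    rcases List.mem_cons.mp ht with rfl | ht'
    · simp
    · exact IH ts' hts' t ht'
  | case5 d hnil h2 h2' h3 h3' IH =>
    intro ts h
    rw [tile?_woo h3', Option.map_eq_some_iff] at h
    obtain ⟨ts', hts', rfl⟩ := h
    intro t ht
    rcases List.mem_cons.mp ht with rfl | ht'
    · simp
    · exact IH ts' hts' t ht'
  | case6 d hnil h2 h2' h3 h3' =>
    intro ts h
    rw [tile?_none hnil h2 h2' h3 h3'] at h
    simp at h

lemma adjOk_cons (t : List Char) (ts : List (List Char)) :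
    adjOk (t :: ts) = ((match ts with | [] => true | u :: _ => t != u) && adjOk ts) := by
  cases ts with
  | nil => simp [adjOk]
  | cons u us => simp [adjOk]

lemma chainOk_eq (b : List Char) (ts : List (List Char)) :
    chainOk b ts = ((match ts with | [] => true | t :: _ => b != t) && adjOk ts) := by
  induction ts generalizing b with
  | nil => simp [chainOk, adjOk]
  | cons t ts' IH =>
    rw [chainOk, IH, adjOk_cons, ← Bool.and_assoc]

lemma chainOk_eq_adjOk (ts : List (List Char)) (h : ∀ t ∈ ts, t ≠ []) :
    chainOk [] ts = adjOk ts := by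
  rw [chainOk_eq]
  cases ts with
  | nil => rfl
  | cons t ts' =>
    have ht := h t (by simp)
    have : (([] : List Char) != t) = true := by
      rw [bne_iff_ne]; exact fun he => ht he.symm
    simp [this]

lemma word_eq (cs : List Char) : solLoop cs 0 [] = bcheck cs := by
  rw [solLoop_eq, bcheck_eq, List.drop_zero]
  cases h : tile? cs with
  | none => rfl
  | some ts => exact chainOk_eq_adjOk ts (tile_nonempty cs ts h)

-- ===== VERDICT (by name: the statement is the Claim_ definition above) =====
theorem solution_spec : Claim_equal_solution := by
  intro babbling _
  unfold Spec_solution solution solution_alt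
  congr 1
  funext a w
  simp only [word_eq]
  rfl
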